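-- pv_equiv track=rewrite | github.com/suzuking19/atcoder | beginners_selection/G.py | card_game
-- ===== SOURCE A (Python) =====
-- def card_game(card_list: list[int]) -> int:
--     alice, bob = 0, 0
--     while len(card_list) > 0:
--         alice_score = max(card_list)
--         alice += alice_score
--         alice_score_index = card_list.index(alice_score)
--         card_list.pop(alice_score_index)
--
--         if len(card_list) == 0:
--             break
--
--         bob_score = max(card_list)
--         bob += bob_score
--         bob_score_index = card_list.index(bob_score)
--         card_list.pop(bob_score_index)
--
--     return alice - bob
-- ===== SOURCE B (Python) =====
-- def card_game(card_list: list[int]) -> int: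
--     # One descending sort, then an alternating-sign sum (Alice takes even
--     # positions, Bob odd).  Note: unlike A, this does not empty card_list.
--     diff, sign = 0, 1
--     for v in sorted(card_list, reverse=True):
--         diff += sign * v
--         sign = -sign
--     return diff
-- ===== Notes on version B (the rewrite author's own statement) =====
-- stated objective: faster
-- what changed: Replaces the repeated max/index/pop loop (quadratic) by one descending sort followed by a single alternating-sign fold; B does not mutate card_list (A empties it).
import Mathlib
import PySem

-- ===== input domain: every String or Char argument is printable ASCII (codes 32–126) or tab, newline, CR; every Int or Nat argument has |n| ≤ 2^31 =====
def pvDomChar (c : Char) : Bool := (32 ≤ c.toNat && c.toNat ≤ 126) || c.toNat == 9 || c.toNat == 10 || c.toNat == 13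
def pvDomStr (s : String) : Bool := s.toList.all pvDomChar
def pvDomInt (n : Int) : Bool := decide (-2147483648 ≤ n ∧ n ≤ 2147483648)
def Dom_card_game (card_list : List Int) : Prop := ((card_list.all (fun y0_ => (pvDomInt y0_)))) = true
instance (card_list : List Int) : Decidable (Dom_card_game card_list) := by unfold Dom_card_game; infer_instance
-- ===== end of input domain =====

-- B replaces A's repeated max/index/pop scan by one descending sort plus an
-- alternating-sign fold; equivalence is about the RETURN value only —
-- Python A empties card_list in place, B does not mutate it.

-- ===== PORT A =====
-- card_list.pop(card_list.index(v)): remove the first occurrence of v.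
-- The 'none'/'getD []' fallbacks are unreachable when v ∈ card_list (index? in range).
def cgPopAt (l : List Int) (v : Int) : List Int :=
  match PySem.List.index? l v with
  | some i => ((PySem.List.pop? l (i : Int)).map Prod.snd).getD []
  | none => []

-- used by cgLoop's decreasing_by
theorem cgPopAt_length_lt (l : List Int) (v : Int) (h : l ≠ []) :
    (cgPopAt l v).length < l.length := by
  have hl : 0 < l.length := List.length_pos_iff.mpr h
  unfold cgPopAt
  cases hi : PySem.List.index? l v with
  | none => simpa using hl
  | some i =>
    cases hp : PySem.List.pop? l (i : Int) with
    | none => simp only [hp, Option.map_none, Option.getD_none]; simpa using hl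
    | some r =>
      have := PySem.List.length_of_pop?_eq_some l hp
      simp only [hp, Option.map_some, Option.getD_some]
      omega

-- the while loop: alice takes the max, then (if cards remain) bob takes the max
def cgLoop (l : List Int) (alice bob : Int) : Int :=
  match hm : PySem.List.max? l (fun x => x) with
  | none => alice - bob                        -- len(card_list) == 0: loop ends
  | some a =>
    let l₁ := cgPopAt l a
    if h0 : l₁.length = 0 then (alice + a) - bob  -- break after alice's pick
    else
      match hm₁ : PySem.List.max? l₁ (fun x => x) with
      | none => (alice + a) - bob              -- unreachable: l₁ ≠ []
      | some b => cgLoop (cgPopAt l₁ b) (alice + a) (bob + b)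
termination_by l.length
decreasing_by
  have hne : l ≠ [] := by
    intro h; rw [h] at hm; simp [PySem.List.max?] at hm
  have hne₁ : l₁ ≠ [] := fun h => h0 (by rw [h]; rfl)
  exact lt_trans (cgPopAt_length_lt l₁ b hne₁) (cgPopAt_length_lt l a hne)

def card_game (card_list : List Int) : Int := cgLoop card_list 0 0

-- ===== PORT B =====
-- sorted(card_list, reverse=True), then one fold: diff += sign * v; sign = -sign
def card_game_alt (card_list : List Int) : Int :=
  ((PySem.List.sorted card_list (fun x => x) true).foldl
      (fun (p : Int × Int) v => (p.1 + p.2 * v, -p.2)) (0, 1)).1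

-- ===== PRECONDITION & SPEC =====
def Spec_card_game (card_list : List Int) (out : Int) : Prop := out = card_game_alt card_list
instance (card_list : List Int) (out : Int) : Decidable (Spec_card_game card_list out) := by unfold Spec_card_game; infer_instance

-- ===== CLAIM (what is proved, stated in full; the proofs are below) =====
def Claim_equal_card_game : Prop := ∀ (card_list : List Int), Dom_card_game card_list → Spec_card_game card_list (card_game card_list)

-- ===== LEMMAS AND PROOFS =====

-- alternating sum, the common value both programs compute
def altSum : List Int → Int
  | [] => 0
  | x :: t => x - altSum t

theorem foldl_sign_eq (m : List Int) (d s : Int) :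
    (m.foldl (fun (p : Int × Int) v => (p.1 + p.2 * v, -p.2)) (d, s)).1
      = d + s * altSum m := by
  induction m generalizing d s with
  | nil => simp [altSum]
  | cons x t ih => simp [List.foldl, altSum, ih]; ring

-- popping the first occurrence of the max commutes with descending sorting
theorem sorted_desc_cons_popAt (l : List Int) (a : Int)
    (hm : PySem.List.max? l (fun x => x) = some a) :
    PySem.List.sorted l (fun x => x) true
      = a :: PySem.List.sorted (cgPopAt l a) (fun x => x) true := by
  have hmem : a ∈ l := PySem.List.max?_mem hm
  have hmax : ∀ y ∈ l, y ≤ a := by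
    simpa using PySem.List.max?_isMax hm
  obtain ⟨k, hk⟩ := Option.isSome_iff_exists.mp
    ((PySem.List.index?_isSome_iff l a).mpr hmem)
  obtain ⟨pre, suf, hl, hkl, -⟩ := (PySem.List.index?_eq_some_iff l a k).mp hk
  have hpop : cgPopAt l a = pre ++ suf := by
    have hklen : k < l.length := by
      rw [hl, List.length_append]; simp [← hkl]
    unfold cgPopAt
    rw [hk]
    show ((PySem.List.pop? l (k : Int)).map Prod.snd).getD [] = pre ++ suf
    rw [PySem.List.pop?_natCast l k hklen]
    simp only [Option.map_some, Option.getD_some]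
    rw [hl, ← hkl, List.eraseIdx_append_of_length_le (le_refl pre.length)]
    simp
  have hperm : (a :: cgPopAt l a).Perm l := by
    rw [hpop, hl]; exact List.perm_middle.symm
  -- both sides are permutations of l ordered by (· ≥ ·); such a list is unique
  refine List.Perm.eq_of_pairwise (le := fun x y : Int => y ≤ x)
    (fun x y _ _ h1 h2 => le_antisymm h2 h1)
    (PySem.List.sorted_pairwise_rev l _)
    (List.pairwise_cons.mpr ⟨?_, PySem.List.sorted_pairwise_rev _ _⟩)
    (((PySem.List.sorted_perm l _ true).trans hperm.symm).trans
      (List.Perm.cons a (PySem.List.sorted_perm (cgPopAt l a) _ true).symm))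
  intro y hy
  have hmem' : y ∈ cgPopAt l a := (PySem.List.sorted_perm _ _ true).mem_iff.mp hy
  exact hmax y (hperm.mem_iff.mp (List.mem_cons_of_mem a hmem'))

theorem cgLoop_eq (l : List Int) (alice bob : Int) :
    cgLoop l alice bob
      = alice - bob + altSum (PySem.List.sorted l (fun x => x) true) := by
  induction l, alice, bob using cgLoop.induct with
  | case1 l alice bob hm =>
    have hnil : l = [] := (PySem.List.max?_eq_none_iff l _).mp hm
    subst hnil
    rw [cgLoop.eq_def]
    split
    · simp [altSum, show PySem.List.sorted ([] : List Int) (fun x => x) true = [] from rfl]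
    · next a' heq => simp [hm] at heq
  | case2 l alice bob a hm l₁ h0 =>
    have hnil : cgPopAt l a = [] := List.length_eq_zero_iff.mp h0
    rw [cgLoop.eq_def]
    split
    · next heq => simp [hm] at heq
    · next a' heq =>
      rw [hm] at heq; injection heq with ha; subst ha
      rw [dif_pos h0, sorted_desc_cons_popAt l a hm, hnil]
      simp [altSum, show PySem.List.sorted ([] : List Int) (fun x => x) true = [] from rfl]
      ring
  | case3 l alice bob a hm l₁ h0 hm₁ =>
    exact absurd ((PySem.List.max?_eq_none_iff l₁ _).mp hm₁)
      (fun h => h0 (by rw [h]; rfl))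
  | case4 l alice bob a hm l₁ h0 b hm₁ ih =>
    rw [cgLoop.eq_def]
    split
    · next heq => simp [hm] at heq
    · next a' heq =>
      rw [hm] at heq; injection heq with ha; subst ha
      rw [dif_neg h0]
      split
      · next heq₁ =>
        cases hm₁.symm.trans heq₁
      · next b' heq₁ =>
        rw [hm₁] at heq₁; injection heq₁ with hb; subst hb
        rw [ih, sorted_desc_cons_popAt l a hm, sorted_desc_cons_popAt l₁ b hm₁]
        simp only [altSum]
        ring

-- ===== VERDICT (by name: the statement is the Claim_ definition above) =====
theorem card_game_spec : Claim_equal_card_game := by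
  intro l _
  unfold Spec_card_game card_game card_game_alt
  rw [foldl_sign_eq, cgLoop_eq]
  ring
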